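-- pv_equiv track=rewrite | github.com/JueonPark/tracegen | ndp_scheduler/utils2/thunk_schedule_parser.py | parse_thunk_schedule
-- ===== SOURCE A (Python) =====
-- def parse_thunk_schedule(ts_string):
--   GPU_thunks = []
--   NDP_thunks = []
--   ts_string_list = ts_string.split('\n')
--   order = 0
--   for line in ts_string_list:
--     if not line.startswith('k'):
--       continue # skip non-kernel line
--
--     line_parsed = line.split('\t')
--     if len(line_parsed) <= 1:
--       continue
--     kernel_name = line_parsed[1].split(' ')[0]
--     if 'Ndp' in kernel_name:
--       NDP_thunks.append((order,kernel_name.replace('%','')))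
--       order+=1
--     elif 'copy' in kernel_name:
--       continue
--     else:
--       GPU_thunks.append((order, kernel_name.replace('%','')))
--       order+=1
--   return GPU_thunks, NDP_thunks
-- ===== SOURCE B (Python) =====
-- def _classify(line):
--   """Return ('NDP'|'GPU', cleaned_name) for a kept kernel line, else None."""
--   if not line.startswith('k'):
--     return None
--   parsed = line.split('\t')
--   if len(parsed) <= 1:
--     return None
--   kernel_name = parsed[1].split(' ')[0]
--   if 'Ndp' in kernel_name:
--     return ('NDP', kernel_name.replace('%', ''))
--   if 'copy' in kernel_name:
--     return None
--   return ('GPU', kernel_name.replace('%', ''))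
--
-- def parse_thunk_schedule(ts_string):
--   kept = [t for t in map(_classify, ts_string.split('\n')) if t is not None]
--   GPU_thunks = [(i, name) for i, (tag, name) in enumerate(kept) if tag == 'GPU']
--   NDP_thunks = [(i, name) for i, (tag, name) in enumerate(kept) if tag == 'NDP']
--   return GPU_thunks, NDP_thunks
-- ===== Notes on version B (the rewrite author's own statement) =====
-- stated objective: simpler
-- what changed: Replaces the interleaved manual order counter and dual appends with a two-phase decomposition: a classify helper maps each line to ('NDP'|'GPU', name) or None, then one enumerate over the kept list partitions into the two outputs by comprehension.
import Mathlib
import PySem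

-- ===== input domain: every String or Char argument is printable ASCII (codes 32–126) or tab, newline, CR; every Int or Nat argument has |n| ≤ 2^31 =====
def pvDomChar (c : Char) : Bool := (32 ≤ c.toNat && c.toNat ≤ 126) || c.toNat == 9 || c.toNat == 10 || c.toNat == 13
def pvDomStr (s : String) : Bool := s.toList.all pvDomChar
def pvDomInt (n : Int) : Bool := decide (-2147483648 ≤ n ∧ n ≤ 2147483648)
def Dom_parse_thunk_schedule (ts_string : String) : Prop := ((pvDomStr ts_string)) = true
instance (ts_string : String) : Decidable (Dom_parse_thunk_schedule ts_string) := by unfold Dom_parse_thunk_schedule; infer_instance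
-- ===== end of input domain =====

-- B replaces A's interleaved order counter with a classify-then-enumerate two-phase decomposition (same cost).

-- s.split(sep) with a literal nonempty sep: Str.split? is some there, so getD [] is exact
def pvSplit (s sep : String) : List String := (PySem.Str.split? s sep).getD []

-- ===== PORT A =====
-- one iteration of A's for-loop; state = (GPU_thunks, NDP_thunks, order)
def pvStepA (st : (List (Int × String)) × (List (Int × String)) × Int) (line : String) :
    (List (Int × String)) × (List (Int × String)) × Int :=
  if !(PySem.Str.startswith line "k") then st
  else
    let line_parsed := pvSplit line "\t"
    if line_parsed.length ≤ 1 then st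
    else
      let kernel_name := (pvSplit (line_parsed.getD 1 "") " ").getD 0 ""
      if PySem.Str.isIn "Ndp" kernel_name then
        (st.1, st.2.1 ++ [(st.2.2, PySem.Str.replace kernel_name "%" "")], st.2.2 + 1)
      else if PySem.Str.isIn "copy" kernel_name then st
      else (st.1 ++ [(st.2.2, PySem.Str.replace kernel_name "%" "")], st.2.1, st.2.2 + 1)

def parse_thunk_schedule (ts_string : String) : (List (Int × String)) × (List (Int × String)) :=
  let st := (pvSplit ts_string "\n").foldl pvStepA ([], [], 0)
  (st.1, st.2.1)

-- ===== PORT B =====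
-- B's _classify helper: some (tag, cleaned name) for a kept kernel line, else none
def pvClassify (line : String) : Option (String × String) :=
  if !(PySem.Str.startswith line "k") then none
  else
    let parsed := pvSplit line "\t"
    if parsed.length ≤ 1 then none
    else
      let kernel_name := (pvSplit (parsed.getD 1 "") " ").getD 0 ""
      if PySem.Str.isIn "Ndp" kernel_name then some ("NDP", PySem.Str.replace kernel_name "%" "")
      else if PySem.Str.isIn "copy" kernel_name then none
      else some ("GPU", PySem.Str.replace kernel_name "%" "")

def parse_thunk_schedule_alt (ts_string : String) : (List (Int × String)) × (List (Int × String)) :=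
  let kept := (pvSplit ts_string "\n").filterMap pvClassify
  let e := PySem.List.enumerate kept 0
  ((e.filter (fun p => p.2.1 == "GPU")).map (fun p => (p.1, p.2.2)),
   (e.filter (fun p => p.2.1 == "NDP")).map (fun p => (p.1, p.2.2)))

-- ===== PRECONDITION & SPEC =====
def Spec_parse_thunk_schedule (ts_string : String) (out : (List (Int × String)) × (List (Int × String))) : Prop := out = parse_thunk_schedule_alt ts_string
instance (ts_string : String) (out : (List (Int × String)) × (List (Int × String))) : Decidable (Spec_parse_thunk_schedule ts_string out) := by unfold Spec_parse_thunk_schedule; infer_instance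

-- ===== CLAIM (what is proved, stated in full; the proofs are below) =====
def Claim_equal_parse_thunk_schedule : Prop := ∀ (ts_string : String), Dom_parse_thunk_schedule ts_string → Spec_parse_thunk_schedule ts_string (parse_thunk_schedule ts_string)

-- ===== LEMMAS AND PROOFS =====

def pvGpuPart (e : List (Int × (String × String))) : List (Int × String) :=
  (e.filter (fun p => p.2.1 == "GPU")).map (fun p => (p.1, p.2.2))

def pvNdpPart (e : List (Int × (String × String))) : List (Int × String) :=
  (e.filter (fun p => p.2.1 == "NDP")).map (fun p => (p.1, p.2.2))

-- A's loop body, expressed through B's classifier (the two share the same branch conditions)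
lemma pvStepA_classify (line : String) (st : (List (Int × String)) × (List (Int × String)) × Int) :
    pvStepA st line =
      match pvClassify line with
      | none => st
      | some (tag, nm) =>
          if tag = "NDP" then (st.1, st.2.1 ++ [(st.2.2, nm)], st.2.2 + 1)
          else (st.1 ++ [(st.2.2, nm)], st.2.1, st.2.2 + 1) := by
  unfold pvStepA pvClassify
  split_ifs <;> simp_all
  split_ifs <;> simp_all

lemma pvClassify_tag {line tag nm : String} (h : pvClassify line = some (tag, nm)) :
    tag = "NDP" ∨ tag = "GPU" := by
  unfold pvClassify at h
  split_ifs at h <;> simp_all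
  obtain ⟨-, h⟩ := h
  split_ifs at h <;> simp_all

lemma pvFoldA_inv (lines : List String) (g n : List (Int × String)) (k : Int) :
    lines.foldl pvStepA (g, n, k) =
      (g ++ pvGpuPart (PySem.List.enumerate (lines.filterMap pvClassify) k),
       n ++ pvNdpPart (PySem.List.enumerate (lines.filterMap pvClassify) k),
       k + (lines.filterMap pvClassify).length) := by
  induction lines generalizing g n k with
  | nil => simp [pvGpuPart, pvNdpPart]
  | cons line rest ih =>
    rw [List.foldl_cons, pvStepA_classify]
    cases hc : pvClassify line with
    | none => simpa [List.filterMap_cons, hc] using ih g n k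
    | some p =>
      obtain ⟨tag, nm⟩ := p
      simp only [List.filterMap_cons, hc]
      rcases pvClassify_tag hc with htag | htag <;> subst htag <;>
        simp [ih, PySem.List.enumerate_cons, pvGpuPart, pvNdpPart] <;> omega

-- ===== VERDICT (by name: the statement is the Claim_ definition above) =====
theorem parse_thunk_schedule_spec : Claim_equal_parse_thunk_schedule := by
  intro ts _
  unfold Spec_parse_thunk_schedule parse_thunk_schedule parse_thunk_schedule_alt
  rw [pvFoldA_inv]
  simp [pvGpuPart, pvNdpPart]
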